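-- pv_equiv track=rewrite | github.com/havoc83/asterisklint | asterisklint/pattern.py | _canonical_pattern_get_ranges
-- ===== SOURCE A (Python) =====
-- def _canonical_pattern_get_ranges(binstr):
--     ranges = []
--     while binstr:
--         maxi = len(binstr) - 1
--         i = 1
--         while maxi >= 2 and i <= maxi:
--             if (binstr[i] - binstr[0] != i):
--                 break
--             i += 1
--         i -= 1
--         if 2 <= i <= maxi and (binstr[i] - binstr[0] == i):
--             ranges.append((binstr[0], binstr[i]))
--             binstr[0:i + 1] = []  # inline remove
--         else:
--             ranges.append((binstr.pop(0),))
--     return ranges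
-- ===== SOURCE B (Python) =====
-- def _flush(ranges, start, prev, cnt):
--     if cnt >= 3:
--         ranges.append((start, prev))
--     elif cnt == 2:
--         ranges.append((start,))
--         ranges.append((prev,))
--     elif cnt == 1:
--         ranges.append((start,))
--
--
-- def _canonical_pattern_get_ranges(binstr):
--     ranges = []
--     start = prev = cnt = 0
--     for v in binstr:
--         if cnt and v - prev == 1:
--             prev = v
--             cnt += 1
--         else:
--             _flush(ranges, start, prev, cnt)
--             start = prev = v
--             cnt = 1
--     _flush(ranges, start, prev, cnt)
--     return ranges
-- ===== Notes on version B (the rewrite author's own statement) =====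
-- stated objective: faster
-- what changed: B replaces A's repeated front-removal from the list (rescanning the prefix run and splicing binstr[0:i+1]=[] each round) with a single forward pass that tracks the current run as (start, prev, count) and flushes it when the run breaks; B also does not mutate its argument (A empties it).
import Mathlib
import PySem

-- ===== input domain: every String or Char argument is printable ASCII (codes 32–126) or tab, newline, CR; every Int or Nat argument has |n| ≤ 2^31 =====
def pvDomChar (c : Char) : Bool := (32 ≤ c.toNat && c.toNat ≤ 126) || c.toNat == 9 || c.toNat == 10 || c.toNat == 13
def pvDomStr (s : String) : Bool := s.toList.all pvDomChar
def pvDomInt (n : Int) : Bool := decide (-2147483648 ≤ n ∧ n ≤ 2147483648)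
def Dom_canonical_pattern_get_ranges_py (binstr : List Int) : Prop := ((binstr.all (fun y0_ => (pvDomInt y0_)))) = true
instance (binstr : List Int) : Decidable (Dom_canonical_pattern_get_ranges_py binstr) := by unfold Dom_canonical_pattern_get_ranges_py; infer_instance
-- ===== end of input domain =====

-- B replaces A's quadratic front-removal loop with one forward pass tracking the current
-- run as (start, prev, count); return values proved equal, but A mutates its argument
-- (empties the list) while B does not — the equivalence is about the return value only.

-- ===== PORT A =====
-- inner 'while maxi >= 2 and i <= maxi: if binstr[i]-binstr[0] != i: break; i += 1';
-- returns the final i.  The Nat argument is fuel that only makes the recursion structural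
-- (len(binstr) always suffices, since the loop runs at most maxi times); indices are always
-- in range here, so pyGetD's default is unreachable.
def pvAFind (bs : List Int) (maxi : Int) : Int → Nat → Int
  | i, 0 => i
  | i, fuel + 1 =>
    if 2 ≤ maxi ∧ i ≤ maxi then
      if PySem.List.pyGetD bs i 0 - PySem.List.pyGetD bs 0 0 ≠ i then i
      else pvAFind bs maxi (i + 1) fuel
    else i

-- outer 'while binstr:' loop, fuel = len(binstr) (each round removes at least one element);
-- 'binstr[0:i+1] = []' is List.drop (i+1).toNat (i ≥ 2 there), 'binstr.pop(0)' appends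
-- [binstr[0]] and drops 1.
def pvALoop : List Int → List (List Int) → Nat → List (List Int)
  | _, ranges, 0 => ranges
  | bs, ranges, fuel + 1 =>
    if bs = [] then ranges
    else
      let maxi : Int := (bs.length : Int) - 1
      let i := pvAFind bs maxi 1 bs.length - 1
      if 2 ≤ i ∧ i ≤ maxi ∧ PySem.List.pyGetD bs i 0 - PySem.List.pyGetD bs 0 0 = i then
        pvALoop (bs.drop (i + 1).toNat) (ranges ++ [[PySem.List.pyGetD bs 0 0, PySem.List.pyGetD bs i 0]]) fuel
      else
        pvALoop (bs.drop 1) (ranges ++ [[PySem.List.pyGetD bs 0 0]]) fuel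

def canonical_pattern_get_ranges_py (binstr : List Int) : List (List Int) :=
  pvALoop binstr [] binstr.length

-- ===== PORT B =====
-- _flush(ranges, start, prev, cnt)
def pvBFlush (start prev cnt : Int) : List (List Int) :=
  if 3 ≤ cnt then [[start, prev]]
  else if cnt = 2 then [[start], [prev]]
  else if cnt = 1 then [[start]]
  else []

-- loop body of the 'for v in binstr' pass; state = (ranges, start, prev, cnt)
def pvBStep (st : List (List Int) × Int × Int × Int) (v : Int) : List (List Int) × Int × Int × Int :=
  if st.2.2.2 ≠ 0 ∧ v - st.2.2.1 = 1 then (st.1, st.2.1, v, st.2.2.2 + 1)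
  else (st.1 ++ pvBFlush st.2.1 st.2.2.1 st.2.2.2, v, v, 1)

def canonical_pattern_get_ranges_py_alt (binstr : List Int) : List (List Int) :=
  let st := binstr.foldl pvBStep ([], 0, 0, 0)
  st.1 ++ pvBFlush st.2.1 st.2.2.1 st.2.2.2

-- ===== PRECONDITION & SPEC =====
def Spec_canonical_pattern_get_ranges_py (binstr : List Int) (out : List (List Int)) : Prop := out = canonical_pattern_get_ranges_py_alt binstr
instance (binstr : List Int) (out : List (List Int)) : Decidable (Spec_canonical_pattern_get_ranges_py binstr out) := by unfold Spec_canonical_pattern_get_ranges_py; infer_instance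

-- ===== CLAIM (what is proved, stated in full; the proofs are below) =====
def Claim_equal_canonical_pattern_get_ranges_py : Prop := ∀ (binstr : List Int), Dom_canonical_pattern_get_ranges_py binstr → Spec_canonical_pattern_get_ranges_py binstr (canonical_pattern_get_ranges_py binstr)

-- ===== LEMMAS AND PROOFS =====

-- length of the consecutive (+1) continuation of a run whose last value is p
def pvRl : Int → List Int → Nat
  | _, [] => 0
  | p, b :: t => if b - p = 1 then pvRl b t + 1 else 0

-- common characterisation: runs of length ≥ 3 become pairs, shorter runs become singles
def pvChunks : List Int → List (List Int)
  | [] => []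
  | a :: t =>
    let k := pvRl a t
    (if 3 ≤ k + 1 then [[a, a + (k : Int)]]
     else (List.range (k + 1)).map (fun j => [a + (j : Int)])) ++ pvChunks (t.drop k)
termination_by l => l.length
decreasing_by simp only [List.length_drop, List.length_cons]; omega

theorem pvRl_le (a : Int) (t : List Int) : pvRl a t ≤ t.length := by
  induction t generalizing a with
  | nil => simp [pvRl]
  | cons b t ih =>
    simp only [pvRl, List.length_cons]
    split
    · exact Nat.succ_le_succ (ih b)
    · omega

theorem pvRl_getD (a : Int) (t : List Int) :
    ∀ k : Nat, k ≤ pvRl a t → (a :: t).getD k 0 = a + k := by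
  induction t generalizing a with
  | nil => intro k hk; simp [pvRl] at hk; simp [hk]
  | cons b t ih =>
    intro k hk
    cases k with
    | zero => simp
    | succ k' =>
      simp only [pvRl] at hk
      by_cases hb : b - a = 1
      · rw [if_pos hb] at hk
        have := ih b k' (by omega)
        simp only [List.getD_cons_succ] at this ⊢
        rw [this]
        push_cast
        omega
      · rw [if_neg hb] at hk
        omega

theorem pvRl_break (a : Int) (t : List Int) (h : pvRl a t < t.length) :
    t.getD (pvRl a t) 0 ≠ a + (pvRl a t : Int) + 1 := by
  induction t generalizing a with
  | nil => simp at h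
  | cons b t ih =>
    simp only [pvRl, List.length_cons] at h ⊢
    by_cases hb : b - a = 1
    · rw [if_pos hb] at h ⊢
      have := ih b (by omega)
      simp only [List.getD_cons_succ]
      intro hcontra
      apply this
      rw [hcontra]
      push_cast
      omega
    · rw [if_neg hb]
      simp only [List.getD_cons_zero]
      intro hcontra
      exact hb (by omega)

theorem pvAFind_stop (a : Int) (t : List Int) (hm : (2:Int) ≤ t.length) :
    ∀ fuel : Nat, pvAFind (a :: t) (t.length) ((pvRl a t : Int) + 1) fuel = (pvRl a t : Int) + 1 := by
  intro fuel
  cases fuel with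
  | zero => rfl
  | succ n =>
    simp only [pvAFind]
    by_cases hle : (pvRl a t : Int) + 1 ≤ (t.length : Int)
    · rw [if_pos ⟨hm, hle⟩]
      have hlt : pvRl a t < t.length := by omega
      have h0 : PySem.List.pyGetD (a :: t) 0 0 = a := by
        simp [PySem.List.pyGetD_zero_cons]
      have h1 : PySem.List.pyGetD (a :: t) ((pvRl a t : Int) + 1) 0 = t.getD (pvRl a t) 0 := by
        have hcast : ((pvRl a t : Int) + 1) = ((pvRl a t + 1 : Nat) : Int) := by push_cast; ring
        rw [hcast, PySem.List.pyGetD_natCast]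
        simp
      have hne : PySem.List.pyGetD (a :: t) ((pvRl a t : Int) + 1) 0
          - PySem.List.pyGetD (a :: t) 0 0 ≠ (pvRl a t : Int) + 1 := by
        rw [h0, h1]
        have := pvRl_break a t hlt
        intro hcon
        exact this (by omega)
      rw [if_pos hne]
    · rw [if_neg (fun hcon => hle hcon.2)]

theorem pvAFind_spec (a : Int) (t : List Int) (hm : (2:Int) ≤ t.length) :
    ∀ (fuel : Nat) (i : Int), 1 ≤ i → i ≤ (pvRl a t : Int) + 1 →
      ((pvRl a t : Int) + 1 - i).toNat ≤ fuel →
      pvAFind (a :: t) (t.length) i fuel = (pvRl a t : Int) + 1 := by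
  intro fuel
  induction fuel with
  | zero =>
    intro i h1 h2 h3
    have hi : i = (pvRl a t : Int) + 1 := by omega
    rw [hi]
    exact pvAFind_stop a t hm 0
  | succ n ih =>
    intro i h1 h2 h3
    by_cases hstop : i = (pvRl a t : Int) + 1
    · rw [hstop]
      exact pvAFind_stop a t hm (n + 1)
    · have hrun : i ≤ (pvRl a t : Int) := by omega
      have hle : i ≤ (t.length : Int) := by
        have := pvRl_le a t
        omega
      simp only [pvAFind]
      rw [if_pos ⟨hm, hle⟩]
      have hval : PySem.List.pyGetD (a :: t) i 0 = a + i := by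
        have hi : i = (i.toNat : Int) := by omega
        rw [hi, PySem.List.pyGetD_natCast, pvRl_getD a t i.toNat (by omega)]
      have h0 : PySem.List.pyGetD (a :: t) 0 0 = a := by
        simp [PySem.List.pyGetD_zero_cons]
      have hne : ¬ (PySem.List.pyGetD (a :: t) i 0 - PySem.List.pyGetD (a :: t) 0 0 ≠ i) := by
        rw [hval, h0]
        omega
      rw [if_neg hne]
      exact ih (i + 1) (by omega) (by omega) (by omega)

theorem pvChunks_single (a : Int) (t : List Int) (h : pvRl a t ≤ 1) :
    pvChunks (a :: t) = [a] :: pvChunks t := by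
  by_cases h0 : pvRl a t = 0
  · rw [pvChunks]
    rw [h0]
    norm_num [List.range_succ]
  · have h1 : pvRl a t = 1 := by omega
    cases t with
    | nil => simp [pvRl] at h1
    | cons b t' =>
      have hb : b - a = 1 := by
        by_contra hb
        simp only [pvRl] at h1
        rw [if_neg hb] at h1
        omega
      have hrl0 : pvRl b t' = 0 := by
        simp only [pvRl] at h1
        rw [if_pos hb] at h1
        omega
      have hR : pvChunks (b :: t') = [b] :: pvChunks t' := by
        rw [pvChunks]
        rw [hrl0]
        norm_num [List.range_succ]
      rw [pvChunks]
      rw [h1, hR]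
      norm_num [List.range_succ]
      omega

theorem pvALoop_eq : ∀ (fuel : Nat) (bs : List Int) (ranges : List (List Int)),
    bs.length ≤ fuel → pvALoop bs ranges fuel = ranges ++ pvChunks bs := by
  intro fuel
  induction fuel with
  | zero =>
    intro bs ranges hlen
    have hnil : bs = [] := by
      cases bs with
      | nil => rfl
      | cons a t => simp at hlen
    rw [hnil]
    simp [pvALoop, pvChunks]
  | succ n ih =>
    intro bs ranges hlen
    cases bs with
    | nil =>
      simp [pvALoop, pvChunks]
    | cons a t =>
      simp only [pvALoop, List.length_cons]
      rw [if_neg (List.cons_ne_nil a t)]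
      rw [show (((t.length + 1 : Nat) : Int) - 1) = (t.length : Int) from by push_cast; ring]
      have h0 : PySem.List.pyGetD (a :: t) 0 0 = a := by
        simp [PySem.List.pyGetD_zero_cons]
      have hlen' : t.length ≤ n := by
        simp only [List.length_cons] at hlen
        omega
      by_cases hm : (2:Int) ≤ (t.length : Int)
      · rw [pvAFind_spec a t hm (t.length + 1) 1 (by norm_num) (by omega)
          (by have := pvRl_le a t; omega)]
        rw [show ((pvRl a t : Int) + 1 - 1) = (pvRl a t : Int) from by ring]
        by_cases h2 : 2 ≤ pvRl a t
        · have hval : PySem.List.pyGetD (a :: t) ((pvRl a t : Nat) : Int) 0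
              = a + (pvRl a t : Int) := by
            rw [PySem.List.pyGetD_natCast]
            exact pvRl_getD a t (pvRl a t) le_rfl
          have hcond : (2:Int) ≤ (pvRl a t : Int) ∧ (pvRl a t : Int) ≤ (t.length : Int) ∧
              PySem.List.pyGetD (a :: t) ((pvRl a t : Nat) : Int) 0
                - PySem.List.pyGetD (a :: t) 0 0 = ((pvRl a t : Nat) : Int) := by
            refine ⟨by omega, by have := pvRl_le a t; omega, ?_⟩
            rw [hval, h0]
            ring
          rw [if_pos hcond]
          rw [show (((pvRl a t : Int)) + 1).toNat = pvRl a t + 1 from by omega]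
          rw [List.drop_succ_cons]
          rw [hval, h0]
          rw [ih (t.drop (pvRl a t)) _ (by simp only [List.length_drop]; omega)]
          conv_rhs => rw [pvChunks]
          rw [if_pos (by omega : 3 ≤ pvRl a t + 1)]
          simp [List.append_assoc]
        · rw [if_neg (by intro hc; have := hc.1; omega)]
          rw [show (a :: t).drop 1 = t from rfl]
          rw [h0]
          rw [ih t _ hlen']
          rw [pvChunks_single a t (by omega)]
          simp
      · rw [show pvAFind (a :: t) (t.length : Int) 1 (t.length + 1) = 1 from by
          simp only [pvAFind]
          rw [if_neg (fun hc => hm hc.1)]]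
        rw [show (1:Int) - 1 = 0 from by ring]
        rw [if_neg (by intro hc; have := hc.1; omega)]
        rw [show (a :: t).drop 1 = t from rfl]
        rw [h0]
        rw [ih t _ hlen']
        have hrl1 : pvRl a t ≤ 1 := by
          have := pvRl_le a t
          omega
        rw [pvChunks_single a t hrl1]
        simp

theorem pvBFlush_emit (a : Int) (k : Nat) :
    pvBFlush a (a + (k : Int)) ((k : Int) + 1) =
      (if 3 ≤ k + 1 then [[a, a + (k : Int)]]
       else (List.range (k + 1)).map (fun j => [a + (j : Int)])) := by
  match k with
  | 0 => norm_num [pvBFlush, List.range_succ]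
  | 1 => norm_num [pvBFlush, List.range_succ]
  | (k + 2) =>
    have h1 : (3:Int) ≤ ((k + 2 : Nat) : Int) + 1 := by push_cast; omega
    rw [if_pos (by omega : 3 ≤ k + 2 + 1)]
    simp only [pvBFlush, if_pos h1]

theorem pvFoldB : ∀ (t : List Int) (acc : List (List Int)) (a p c : Int),
    1 ≤ c → p = a + c - 1 →
    (let st := t.foldl pvBStep (acc, a, p, c)
     st.1 ++ pvBFlush st.2.1 st.2.2.1 st.2.2.2)
    = acc ++ pvBFlush a (p + (pvRl p t : Int)) (c + (pvRl p t : Int))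
        ++ pvChunks (t.drop (pvRl p t)) := by
  intro t
  induction t with
  | nil =>
    intro acc a p c hc hp
    simp [pvRl, pvChunks]
  | cons v t' ih =>
    intro acc a p c hc hp
    dsimp only
    rw [List.foldl_cons]
    by_cases hv : v - p = 1
    · have hstep : pvBStep (acc, a, p, c) v = (acc, a, v, c + 1) := by
        simp [pvBStep, hv]
        omega
      rw [hstep]
      have := ih acc a v (c + 1) (by omega) (by omega)
      dsimp only at this
      rw [this]
      have hrl : pvRl p (v :: t') = pvRl v t' + 1 := by
        simp only [pvRl]
        rw [if_pos hv]
      rw [hrl, List.drop_succ_cons]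
      have e1 : v + (pvRl v t' : Int) = p + ((pvRl v t' + 1 : Nat) : Int) := by
        push_cast; omega
      have e2 : c + 1 + (pvRl v t' : Int) = c + ((pvRl v t' + 1 : Nat) : Int) := by
        push_cast; ring
      rw [e1, e2]
    · have hstep : pvBStep (acc, a, p, c) v
          = (acc ++ pvBFlush a p c, v, v, 1) := by
        simp [pvBStep, hv]
      rw [hstep]
      have := ih (acc ++ pvBFlush a p c) v v 1 le_rfl (by ring)
      dsimp only at this
      rw [this]
      have hrl : pvRl p (v :: t') = 0 := by
        simp only [pvRl]
        rw [if_neg hv]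
      rw [hrl]
      simp only [Nat.cast_zero, add_zero, List.drop_zero]
      conv_rhs => rw [pvChunks]
      rw [← pvBFlush_emit v (pvRl v t')]
      rw [show (1:Int) + (pvRl v t' : Int) = (pvRl v t' : Int) + 1 from by ring]
      simp [List.append_assoc]

theorem pvAlt_eq (bs : List Int) : canonical_pattern_get_ranges_py_alt bs = pvChunks bs := by
  cases bs with
  | nil => simp [canonical_pattern_get_ranges_py_alt, pvBFlush, pvChunks]
  | cons a t =>
    unfold canonical_pattern_get_ranges_py_alt
    dsimp only
    rw [List.foldl_cons]
    have hstep : pvBStep ([], 0, 0, 0) a = ([], a, a, 1) := by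
      norm_num [pvBStep, pvBFlush]
    rw [hstep]
    have := pvFoldB t [] a a 1 le_rfl (by ring)
    dsimp only at this
    rw [this]
    rw [show (1:Int) + (pvRl a t : Int) = (pvRl a t : Int) + 1 from by ring]
    rw [pvBFlush_emit a (pvRl a t)]
    conv_rhs => rw [pvChunks]
    simp

-- ===== VERDICT (by name: the statement is the Claim_ definition above) =====
theorem canonical_pattern_get_ranges_py_spec : Claim_equal_canonical_pattern_get_ranges_py := by
  intro binstr _
  unfold Spec_canonical_pattern_get_ranges_py canonical_pattern_get_ranges_py
  rw [pvAlt_eq]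
  simpa using pvALoop_eq binstr.length binstr [] le_rfl
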